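-- pv_equiv track=rewrite | github.com/Jinhoss/TIL | Algorithm/programmers/택배 배달과 수거하기.py | solution
-- ===== SOURCE A (Python) =====
-- def solution(cap, n, deliveries, pickups):
--     answer = 0
--
--     deli_cnt = 0
--     pick_cnt = 0
--
--     for i in range(n-1, -1, -1):
--         deli_cnt += deliveries[i]
--         pick_cnt += pickups[i]
--
--         while deli_cnt > 0 or pick_cnt > 0:
--             deli_cnt -= cap
--             pick_cnt -= cap
--             answer += (i+1) * 2
--
--     return answer
-- ===== SOURCE B (Python) =====
-- def solution(cap, n, deliveries, pickups):
--     def trips(boxes):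
--         acc = 0
--         stops = []
--         for i in range(n - 1, -1, -1):
--             acc += boxes[i]
--             while acc > 0:
--                 stops.append(i + 1)
--                 acc -= cap
--         return stops
--
--     d = trips(deliveries)
--     p = trips(pickups)
--     m = max(len(d), len(p))
--     d += [0] * (m - len(d))
--     p += [0] * (m - len(p))
--     return 2 * sum(max(x, y) for x, y in zip(d, p))
-- ===== Notes on version B (the rewrite author's own statement) =====
-- stated objective: alternative
-- what changed: Replaces A's single fused right-to-left scan (one accumulator pair with an interleaved while that charges both counters) by two independent right-to-left scans that each emit a descending list of per-trip farthest stops, combined afterwards by a zero-padded index-wise max-sum pass.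
-- outside the precondition, e.g. on solution(0, 1, [0], [0]): A returns 0, B returns 0
import Mathlib
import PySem

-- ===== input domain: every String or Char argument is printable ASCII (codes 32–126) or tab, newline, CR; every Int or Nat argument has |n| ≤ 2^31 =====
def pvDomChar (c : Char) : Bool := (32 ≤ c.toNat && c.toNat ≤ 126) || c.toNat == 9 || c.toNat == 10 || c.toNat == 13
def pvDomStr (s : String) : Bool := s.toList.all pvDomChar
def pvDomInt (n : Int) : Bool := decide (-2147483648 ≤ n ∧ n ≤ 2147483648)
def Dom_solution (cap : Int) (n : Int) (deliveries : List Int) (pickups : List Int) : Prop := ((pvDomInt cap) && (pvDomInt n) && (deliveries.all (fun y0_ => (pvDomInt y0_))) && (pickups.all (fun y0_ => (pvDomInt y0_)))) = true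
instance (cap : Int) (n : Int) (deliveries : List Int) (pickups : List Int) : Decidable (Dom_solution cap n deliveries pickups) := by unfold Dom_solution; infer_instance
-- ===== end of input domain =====

-- B replaces A's single fused right-to-left scan by two independent trip-list scans merged by a zero-padded index-wise max-sum; equal on Pre_ (alternative decomposition, not claimed faster).

-- ===== PORT A =====
-- the inner `while deli_cnt > 0 or pick_cnt > 0` loop; fuel = dc.toNat + pc.toNat bounds
-- its iteration count whenever cap ≥ 1 (cap ≤ 0, where Python diverges, is outside Pre_)
def pvWhileA (cap i : Int) : Nat → Int × Int × Int → Int × Int × Int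
  | 0, s => s
  | fuel+1, (ans, dc, pc) =>
    if dc > 0 ∨ pc > 0 then pvWhileA cap i fuel (ans + (i+1)*2, dc - cap, pc - cap)
    else (ans, dc, pc)

def solution (cap : Int) (n : Int) (deliveries : List Int) (pickups : List Int) : Int :=
  ((PySem.List.pyRange (n-1) (-1) (-1)).foldl
    (fun (s : Int × Int × Int) i =>
      -- deliveries[i] / pickups[i]: IndexError (pyGet? = none) is excluded by Pre_solution
      let dc := s.2.1 + PySem.List.pyGetD deliveries i 0
      let pc := s.2.2 + PySem.List.pyGetD pickups i 0
      pvWhileA cap i (dc.toNat + pc.toNat) (s.1, dc, pc))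
    (0, 0, 0)).1

-- ===== PORT B =====
-- the inner `while acc > 0` loop of B's trips(); fuel = acc.toNat suffices when cap ≥ 1
def pvWhileB (cap i : Int) : Nat → Int → List Int → Int × List Int
  | 0, acc, st => (acc, st)
  | fuel+1, acc, st =>
    if acc > 0 then pvWhileB cap i fuel (acc - cap) (st ++ [i+1]) else (acc, st)

def pvTrips (cap n : Int) (boxes : List Int) : List Int :=
  ((PySem.List.pyRange (n-1) (-1) (-1)).foldl
    (fun (s : Int × List Int) i =>
      let acc := s.1 + PySem.List.pyGetD boxes i 0
      pvWhileB cap i acc.toNat acc s.2)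
    (0, [])).2

def solution_alt (cap : Int) (n : Int) (deliveries : List Int) (pickups : List Int) : Int :=
  let d := pvTrips cap n deliveries
  let p := pvTrips cap n pickups
  let m := max d.length p.length
  let d' := d ++ List.replicate (m - d.length) 0
  let p' := p ++ List.replicate (m - p.length) 0
  2 * ((d'.zip p').foldl (fun s xy => s + max xy.1 xy.2) 0)

-- ===== PRECONDITION & SPEC =====
-- Pre_ excludes cap ≤ 0 when n > 0, where Python A loops forever unless every running total
-- stays ≤ 0 (in that degenerate case A returns 0 and so does B, see cites), and n > len(deliveries)
-- or n > len(pickups), where A raises IndexError; n ≤ 0 is admitted with any cap (empty range).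
def Pre_solution (cap : Int) (n : Int) (deliveries : List Int) (pickups : List Int) : Prop :=
  (1 ≤ cap ∨ n ≤ 0) ∧ n ≤ (deliveries.length : Int) ∧ n ≤ (pickups.length : Int)
instance (cap : Int) (n : Int) (deliveries : List Int) (pickups : List Int) : Decidable (Pre_solution cap n deliveries pickups) := by unfold Pre_solution; infer_instance

def pvWitness_solution : Int × Int × List Int × List Int := (4, 2, [1, 0], [0, 2])

def Spec_solution (cap : Int) (n : Int) (deliveries : List Int) (pickups : List Int) (out : Int) : Prop := out = solution_alt cap n deliveries pickups
instance (cap : Int) (n : Int) (deliveries : List Int) (pickups : List Int) (out : Int) : Decidable (Spec_solution cap n deliveries pickups out) := by unfold Spec_solution; infer_instance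

-- ===== CLAIM (what is proved, stated in full; the proofs are below) =====
def Claim_equal_solution : Prop := ∀ (cap : Int) (n : Int) (deliveries : List Int) (pickups : List Int), Dom_solution cap n deliveries pickups → Pre_solution cap n deliveries pickups → Spec_solution cap n deliveries pickups (solution cap n deliveries pickups)

-- ===== LEMMAS AND PROOFS =====

-- trip-count of A's fused while loop, as a fuel recursion
def pvTA (cap : Int) : Nat → Int → Int → Nat
  | 0, _, _ => 0
  | f+1, dc, pc => if dc > 0 ∨ pc > 0 then pvTA cap f (dc-cap) (pc-cap) + 1 else 0

-- trip-count of B's single-accumulator while loop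
def pvTB (cap : Int) : Nat → Int → Nat
  | 0, _ => 0
  | f+1, a => if a > 0 then pvTB cap f (a-cap) + 1 else 0

-- canonical (fuel-saturated) trip counts
def pvTBc (cap a : Int) : Nat := pvTB cap a.toNat a
def pvTAc (cap dc pc : Int) : Nat := pvTA cap (dc.toNat + pc.toNat) dc pc

-- index-wise max-sum of two lists, shorter one 0-padded (entries nonnegative)
def pvH : List Int → List Int → Int
  | [], ys => ys.sum
  | x::xs, [] => (x::xs).sum
  | x::xs, y::ys => max x y + pvH xs ys

-- the fold step functions of the two ports, named for the proofs (definitionally equal to the inline lambdas)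
def pvStepA (cap : Int) (deliveries pickups : List Int) : Int × Int × Int → Int → Int × Int × Int :=
  fun s i =>
    let dc := s.2.1 + PySem.List.pyGetD deliveries i 0
    let pc := s.2.2 + PySem.List.pyGetD pickups i 0
    pvWhileA cap i (dc.toNat + pc.toNat) (s.1, dc, pc)

def pvStepB (cap : Int) (boxes : List Int) : Int × List Int → Int → Int × List Int :=
  fun s i =>
    let acc := s.1 + PySem.List.pyGetD boxes i 0
    pvWhileB cap i acc.toNat acc s.2

theorem pvWhileA_eq (cap i : Int) : ∀ (f : Nat) (ans dc pc : Int),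
    pvWhileA cap i f (ans, dc, pc) =
      (ans + (i+1)*2*(pvTA cap f dc pc), dc - cap*(pvTA cap f dc pc), pc - cap*(pvTA cap f dc pc)) := by
  intro f
  induction f with
  | zero => intro ans dc pc; simp [pvWhileA, pvTA]
  | succ f ih =>
    intro ans dc pc
    by_cases h : dc > 0 ∨ pc > 0
    · simp only [pvWhileA, pvTA, if_pos h, ih]
      simp only [Prod.mk.injEq]
      refine ⟨by push_cast; ring, by push_cast; ring, by push_cast; ring⟩
    · simp [pvWhileA, pvTA, if_neg h]

theorem pvWhileB_eq (cap i : Int) : ∀ (f : Nat) (acc : Int) (st : List Int),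
    pvWhileB cap i f acc st =
      (acc - cap*(pvTB cap f acc), st ++ List.replicate (pvTB cap f acc) (i+1)) := by
  intro f
  induction f with
  | zero => intro acc st; simp [pvWhileB, pvTB]
  | succ f ih =>
    intro acc st
    by_cases h : acc > 0
    · simp only [pvWhileB, pvTB, if_pos h, ih]
      simp only [Prod.mk.injEq]
      refine ⟨by push_cast; ring, by rw [List.append_assoc, List.replicate_succ]; rfl⟩
    · simp [pvWhileB, pvTB, if_neg h]

theorem pvTB_nonpos (cap : Int) (f : Nat) (a : Int) (h : a ≤ 0) : pvTB cap f a = 0 := by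
  cases f with
  | zero => simp [pvTB]
  | succ f => simp [pvTB]; omega

theorem pvTB_fuel (cap : Int) (hcap : 1 ≤ cap) : ∀ (f f' : Nat) (a : Int),
    a.toNat ≤ f → a.toNat ≤ f' → pvTB cap f a = pvTB cap f' a := by
  intro f
  induction f with
  | zero =>
    intro f' a h h'
    have : a ≤ 0 := by omega
    rw [pvTB_nonpos cap _ _ this, pvTB_nonpos cap _ _ this]
  | succ f ih =>
    intro f' a h h'
    by_cases ha : a > 0
    · obtain ⟨f'', rfl⟩ : ∃ f'', f' = f'' + 1 := ⟨f' - 1, by omega⟩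
      simp only [pvTB, if_pos ha]
      rw [ih f'' (a - cap) (by omega) (by omega)]
    · have ha0 : a ≤ 0 := by omega
      rw [pvTB_nonpos cap _ _ ha0, pvTB_nonpos cap _ _ ha0]

theorem pvTAc_eq_max (cap : Int) (hcap : 1 ≤ cap) (dc pc : Int) :
    pvTAc cap dc pc = max (pvTBc cap dc) (pvTBc cap pc) := by
  have gen : ∀ (f : Nat) (dc pc : Int), dc.toNat + pc.toNat ≤ f →
      pvTA cap f dc pc = max (pvTB cap f dc) (pvTB cap f pc) := by
    intro f
    induction f with
    | zero =>
      intro dc pc h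
      simp [pvTA, pvTB]
    | succ f ih =>
      intro dc pc h
      by_cases hc : dc > 0 ∨ pc > 0
      · simp only [pvTA, if_pos hc]
        rw [ih (dc - cap) (pc - cap) (by omega)]
        have e1 : pvTB cap (f+1) dc = if dc > 0 then pvTB cap f (dc - cap) + 1 else 0 := rfl
        have e2 : pvTB cap (f+1) pc = if pc > 0 then pvTB cap f (pc - cap) + 1 else 0 := rfl
        by_cases h1 : dc > 0 <;> by_cases h2 : pc > 0 <;>
          simp only [e1, e2, if_pos, if_neg, h1, h2, if_true, if_false]
        · omega
        · rw [pvTB_nonpos cap f (pc - cap) (by omega)]; omega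
        · rw [pvTB_nonpos cap f (dc - cap) (by omega)]; omega
        · omega
      · push_neg at hc
        simp only [pvTA, if_neg (by omega : ¬ (dc > 0 ∨ pc > 0))]
        rw [pvTB_nonpos cap (f+1) dc (by omega), pvTB_nonpos cap (f+1) pc (by omega)]
        simp
  unfold pvTAc pvTBc
  rw [gen (dc.toNat + pc.toNat) dc pc le_rfl,
    pvTB_fuel cap hcap (dc.toNat + pc.toNat) dc.toNat dc (by omega) le_rfl,
    pvTB_fuel cap hcap (dc.toNat + pc.toNat) pc.toNat pc (by omega) le_rfl]

theorem pvTBc_sub_cap (cap : Int) (hcap : 1 ≤ cap) (a : Int) :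
    pvTBc cap (a - cap) = pvTBc cap a - 1 := by
  by_cases ha : a > 0
  · unfold pvTBc
    obtain ⟨k, hk⟩ : ∃ k, a.toNat = k + 1 := ⟨a.toNat - 1, by omega⟩
    rw [hk]
    have h1 : pvTB cap (k+1) a = if a > 0 then pvTB cap k (a - cap) + 1 else 0 := rfl
    rw [h1, if_pos ha, pvTB_fuel cap hcap ((a-cap).toNat) k (a - cap) le_rfl (by omega)]
    omega
  · rw [pvTBc, pvTBc, pvTB_nonpos cap _ _ (by omega), pvTB_nonpos cap _ _ (by omega)]

theorem pvTBc_shift (cap : Int) (hcap : 1 ≤ cap) (e : Nat) (a : Int) :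
    pvTBc cap (a - cap * e) = pvTBc cap a - e := by
  induction e with
  | zero => simp
  | succ e ih =>
    have : a - cap * (e+1 : Nat) = (a - cap * e) - cap := by push_cast; ring
    rw [this, pvTBc_sub_cap cap hcap, ih]
    omega

theorem pvH_symm : ∀ (X Y : List Int), pvH X Y = pvH Y X := by
  intro X
  induction X with
  | nil => intro Y; cases Y <;> simp [pvH]
  | cons x xs ih =>
    intro Y
    cases Y with
    | nil => simp [pvH]
    | cons y ys => simp [pvH, ih ys, max_comm]

theorem pvH_rep (v : Int) (hv : 0 ≤ v) : ∀ (td tp : Nat),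
    pvH (List.replicate td v) (List.replicate tp v) = v * (max td tp : Nat) := by
  intro td
  induction td with
  | zero =>
    intro tp
    simp [pvH, List.sum_replicate, nsmul_eq_mul, mul_comm]
  | succ td ih =>
    intro tp
    cases tp with
    | zero =>
      show ((List.replicate (td+1) v).sum : Int) = _
      simp [List.sum_replicate, nsmul_eq_mul]
      push_cast
      ring
    | succ tp =>
      show max v v + pvH (List.replicate td v) (List.replicate tp v) = _
      rw [max_self, ih tp]
      have : max (td+1) (tp+1) = max td tp + 1 := by omega
      rw [this]
      push_cast
      ring

theorem pvH_rep_app (v : Int) (hv : 0 ≤ v) : ∀ (P : List Int), (∀ y ∈ P, v ≤ y) → ∀ (td tp : Nat),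
    pvH (List.replicate td v) (P ++ List.replicate tp v)
      = P.sum + v * ((max td (P.length + tp) : Nat) - (P.length : Nat)) := by
  intro P
  induction P with
  | nil =>
    intro _ td tp
    show pvH (List.replicate td v) (List.replicate tp v) = _
    rw [pvH_rep v hv]
    simp
  | cons y ys ih =>
    intro hP td tp
    cases td with
    | zero =>
      show ((y :: ys ++ List.replicate tp v).sum : Int) = _
      simp [List.sum_append, List.sum_replicate, nsmul_eq_mul]
      push_cast
      ring
    | succ td =>
      show max v y + pvH (List.replicate td v) (ys ++ List.replicate tp v) = _
      rw [max_eq_right (hP y (by simp)), ih (fun z hz => hP z (by simp [hz])) td tp]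
      have : max (td+1) ((ys.length + 1) + tp) = max td (ys.length + tp) + 1 := by omega
      simp only [List.length_cons, List.sum_cons]
      rw [show ys.length + 1 + tp = (ys.length + tp) + 1 from by omega, show max (td+1) ((ys.length + tp) + 1) = max td (ys.length + tp) + 1 from by omega]
      push_cast
      ring

theorem pvH_app (v : Int) (hv : 0 ≤ v) : ∀ (D P : List Int), (∀ x ∈ D, v ≤ x) → (∀ y ∈ P, v ≤ y) →
    ∀ (td tp : Nat),
    pvH (D ++ List.replicate td v) (P ++ List.replicate tp v)
      = pvH D P + v * (((max (D.length + td) (P.length + tp) : Nat) : Int) - ((max D.length P.length : Nat) : Int)) := by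
  intro D
  induction D with
  | nil =>
    intro P _ hP td tp
    have h0 : pvH ([] : List Int) P = P.sum := by cases P <;> simp [pvH]
    rw [List.nil_append, pvH_rep_app v hv P hP td tp, h0]
    simp only [List.length_nil, Nat.zero_add, Nat.zero_max]
  | cons x xs ih =>
    intro P hD hP td tp
    cases P with
    | nil =>
      rw [pvH_symm, List.nil_append, pvH_rep_app v hv (x::xs) hD tp td, pvH_symm]
      congr 1
      congr 1
      simp only [List.length_cons, List.length_nil]
      omega
    | cons y ys =>
      show max x y + pvH (xs ++ List.replicate td v) (ys ++ List.replicate tp v) = _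
      rw [ih ys (fun z hz => hD z (by simp [hz])) (fun z hz => hP z (by simp [hz])) td tp]
      have h2 : pvH (x::xs) (y::ys) = max x y + pvH xs ys := rfl
      rw [h2]
      have : (((max (xs.length + td) (ys.length + tp) : Nat) : Int) - ((max xs.length ys.length : Nat) : Int))
           = (((max ((x::xs).length + td) ((y::ys).length + tp) : Nat) : Int) - ((max (x::xs).length (y::ys).length : Nat) : Int)) := by
        simp only [List.length_cons]
        omega
      rw [this]
      ring

theorem pvZipFold (g : Int × Int → Int) : ∀ (L : List (Int × Int)) (s : Int),
    L.foldl (fun (s : Int) (xy : Int × Int) => s + g xy) s = s + (L.map g).sum := by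
  intro L
  induction L with
  | nil => intro s; simp
  | cons x xs ih => intro s; simp [List.foldl_cons, ih, add_assoc]

theorem pvZms_swap : ∀ (L1 L2 : List Int),
    ((L1.zip L2).map (fun xy : Int × Int => max xy.1 xy.2)).sum
      = ((L2.zip L1).map (fun xy : Int × Int => max xy.1 xy.2)).sum := by
  intro L1
  induction L1 with
  | nil => intro L2; cases L2 <;> simp
  | cons x xs ih =>
    intro L2
    cases L2 with
    | nil => simp
    | cons y ys =>
      simp only [List.zip_cons_cons, List.map_cons, List.sum_cons, ih ys]
      rw [max_comm]

theorem pvZipPad0 : ∀ (Y : List Int) (b a : Nat), (∀ y ∈ Y, 0 ≤ y) → a = Y.length + b →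
    (((List.replicate a (0:Int)).zip (Y ++ List.replicate b (0:Int))).map
      (fun xy : Int × Int => max xy.1 xy.2)).sum = Y.sum := by
  intro Y
  induction Y with
  | nil =>
    intro b a _ hlen
    simp only [List.length_nil, Nat.zero_add] at hlen
    subst hlen
    simp [List.zip_replicate]
  | cons y ys ih =>
    intro b a hY hlen
    simp only [List.length_cons] at hlen
    obtain ⟨a', rfl⟩ : ∃ a', a = a' + 1 := ⟨a - 1, by omega⟩
    simp only [List.replicate_succ, List.cons_append, List.zip_cons_cons, List.map_cons,
      List.sum_cons]
    rw [ih b a' (fun z hz => hY z (by simp [hz])) (by omega)]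
    rw [max_eq_right (hY y (by simp))]

theorem pvZipPad : ∀ (X Y : List Int) (a b : Nat), (∀ x ∈ X, 0 ≤ x) → (∀ y ∈ Y, 0 ≤ y) →
    X.length + a = Y.length + b →
    ((((X ++ List.replicate a 0).zip (Y ++ List.replicate b 0)).map (fun xy : Int × Int => max xy.1 xy.2)).sum) = pvH X Y := by
  intro X
  induction X with
  | nil =>
    intro Y a b _ hY hlen
    rw [List.nil_append, pvZipPad0 Y b a hY (by simpa using hlen)]
    cases Y <;> rfl
  | cons x xs ih =>
    intro Y a b hX hY hlen
    cases Y with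
    | nil =>
      rw [List.nil_append, pvZms_swap,
        pvZipPad0 (x::xs) a b hX (by simp only [List.length_nil, Nat.zero_add] at hlen; omega)]
      rfl
    | cons y ys =>
      simp only [List.cons_append, List.zip_cons_cons, List.map_cons, List.sum_cons]
      rw [ih ys a b (fun z hz => hX z (by simp [hz])) (fun z hz => hY z (by simp [hz]))
        (by simp only [List.length_cons] at hlen; omega)]
      rfl

-- all elements of a (partial) trips list are ≥ 1
theorem pvStepA_eq (cap : Int) (deliveries pickups : List Int) (ans dc pc i : Int) :
    pvStepA cap deliveries pickups (ans, dc, pc) i =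
      (ans + (i+1)*2*(pvTAc cap (dc + PySem.List.pyGetD deliveries i 0) (pc + PySem.List.pyGetD pickups i 0)),
       dc + PySem.List.pyGetD deliveries i 0 - cap*(pvTAc cap (dc + PySem.List.pyGetD deliveries i 0) (pc + PySem.List.pyGetD pickups i 0)),
       pc + PySem.List.pyGetD pickups i 0 - cap*(pvTAc cap (dc + PySem.List.pyGetD deliveries i 0) (pc + PySem.List.pyGetD pickups i 0))) := by
  show pvWhileA cap i ((dc + PySem.List.pyGetD deliveries i 0).toNat + (pc + PySem.List.pyGetD pickups i 0).toNat)
      (ans, dc + PySem.List.pyGetD deliveries i 0, pc + PySem.List.pyGetD pickups i 0) = _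
  rw [pvWhileA_eq]
  rfl

theorem pvStepB_eq (cap : Int) (boxes : List Int) (acc i : Int) (st : List Int) :
    pvStepB cap boxes (acc, st) i =
      (acc + PySem.List.pyGetD boxes i 0 - cap*(pvTBc cap (acc + PySem.List.pyGetD boxes i 0)),
       st ++ List.replicate (pvTBc cap (acc + PySem.List.pyGetD boxes i 0)) (i+1)) := by
  show pvWhileB cap i (acc + PySem.List.pyGetD boxes i 0).toNat (acc + PySem.List.pyGetD boxes i 0) st = _
  rw [pvWhileB_eq]
  rfl

theorem pvTrips_pos (cap : Int) (boxes : List Int) : ∀ (L : List Int) (acc : Int) (st : List Int),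
    (∀ i ∈ L, 0 ≤ i) → (∀ x ∈ st, 1 ≤ x) →
    ∀ x ∈ (L.foldl (pvStepB cap boxes) (acc, st)).2, 1 ≤ x := by
  intro L
  induction L with
  | nil => intro acc st _ hst; simpa using hst
  | cons i L ih =>
    intro acc st hpos hst
    simp only [List.foldl_cons, pvStepB_eq]
    refine ih _ _ (fun j hj => hpos j (List.mem_cons_of_mem _ hj)) ?_
    intro x hx
    rcases List.mem_append.mp hx with h | h
    · exact hst x h
    · have hx1 := List.eq_of_mem_replicate h
      have hi := hpos i List.mem_cons_self
      omega

-- the main simultaneous loop invariant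
theorem pvMain (cap : Int) (hcap : 1 ≤ cap) (deliveries pickups : List Int) :
    ∀ (L : List Int) (ans dc pc accD accP : Int) (D P : List Int),
    (∀ i ∈ L, ∀ x ∈ D, i + 1 ≤ x) → (∀ i ∈ L, ∀ y ∈ P, i + 1 ≤ y) →
    (∀ i ∈ L, 0 ≤ i) → L.Pairwise (fun a b => b ≤ a) →
    dc = accD - cap * (((max D.length P.length : Nat) : Int) - (D.length : Int)) →
    pc = accP - cap * (((max D.length P.length : Nat) : Int) - (P.length : Int)) →
    ans = 2 * pvH D P →
    (L.foldl (pvStepA cap deliveries pickups) (ans, dc, pc)).1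
      = 2 * pvH (L.foldl (pvStepB cap deliveries) (accD, D)).2
               (L.foldl (pvStepB cap pickups) (accP, P)).2 := by
  intro L
  induction L with
  | nil =>
    intro ans dc pc accD accP D P _ _ _ _ _ _ hans
    simpa using hans
  | cons i L ihL =>
    intro ans dc pc accD accP D P hDb hPb hpos hpw hdc hpc hans
    simp only [List.foldl_cons, pvStepA_eq, pvStepB_eq]
    have hi0 : 0 ≤ i := hpos i List.mem_cons_self
    have htl : ∀ j ∈ L, j ≤ i := fun j hj => (List.pairwise_cons.mp hpw).1 j hj
    have hdc' : dc + PySem.List.pyGetD deliveries i 0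
        = (accD + PySem.List.pyGetD deliveries i 0)
          - cap * ((max D.length P.length - D.length : Nat) : Int) := by
      rw [hdc]
      have hc : ((max D.length P.length - D.length : Nat) : Int)
          = ((max D.length P.length : Nat) : Int) - (D.length : Int) := by omega
      rw [hc]; ring
    have hpc' : pc + PySem.List.pyGetD pickups i 0
        = (accP + PySem.List.pyGetD pickups i 0)
          - cap * ((max D.length P.length - P.length : Nat) : Int) := by
      rw [hpc]
      have hc : ((max D.length P.length - P.length : Nat) : Int)
          = ((max D.length P.length : Nat) : Int) - (P.length : Int) := by omega
      rw [hc]; ring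
    have k1 : pvTBc cap (dc + PySem.List.pyGetD deliveries i 0)
        = pvTBc cap (accD + PySem.List.pyGetD deliveries i 0) - (max D.length P.length - D.length) := by
      rw [hdc', pvTBc_shift cap hcap]
    have k2 : pvTBc cap (pc + PySem.List.pyGetD pickups i 0)
        = pvTBc cap (accP + PySem.List.pyGetD pickups i 0) - (max D.length P.length - P.length) := by
      rw [hpc', pvTBc_shift cap hcap]
    have htmax : pvTAc cap (dc + PySem.List.pyGetD deliveries i 0) (pc + PySem.List.pyGetD pickups i 0)
        = max (pvTBc cap (accD + PySem.List.pyGetD deliveries i 0) - (max D.length P.length - D.length))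
              (pvTBc cap (accP + PySem.List.pyGetD pickups i 0) - (max D.length P.length - P.length)) := by
      rw [pvTAc_eq_max cap hcap, k1, k2]
    refine ihL _ _ _ _ _ _ _ ?_ ?_ (fun j hj => hpos j (List.mem_cons_of_mem _ hj))
      (List.pairwise_cons.mp hpw).2 ?_ ?_ ?_
    · intro j hj x hx
      rcases List.mem_append.mp hx with h | h
      · exact hDb j (List.mem_cons_of_mem _ hj) x h
      · have := List.eq_of_mem_replicate h
        have := htl j hj
        omega
    · intro j hj y hy
      rcases List.mem_append.mp hy with h | h
      · exact hPb j (List.mem_cons_of_mem _ hj) y h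
      · have := List.eq_of_mem_replicate h
        have := htl j hj
        omega
    · simp only [List.length_append, List.length_replicate]
      have harith : ((max D.length P.length - D.length : Nat) : Int)
            + (pvTAc cap (dc + PySem.List.pyGetD deliveries i 0) (pc + PySem.List.pyGetD pickups i 0) : Int)
          = (pvTBc cap (accD + PySem.List.pyGetD deliveries i 0) : Int)
            + (((max (D.length + pvTBc cap (accD + PySem.List.pyGetD deliveries i 0))
                     (P.length + pvTBc cap (accP + PySem.List.pyGetD pickups i 0)) : Nat) : Int)
               - ((D.length : Int) + (pvTBc cap (accD + PySem.List.pyGetD deliveries i 0) : Int))) := by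
        omega
      push_cast at harith hdc' ⊢
      linear_combination hdc' + (-(cap:Int)) * harith
    · simp only [List.length_append, List.length_replicate]
      have harith : ((max D.length P.length - P.length : Nat) : Int)
            + (pvTAc cap (dc + PySem.List.pyGetD deliveries i 0) (pc + PySem.List.pyGetD pickups i 0) : Int)
          = (pvTBc cap (accP + PySem.List.pyGetD pickups i 0) : Int)
            + (((max (D.length + pvTBc cap (accD + PySem.List.pyGetD deliveries i 0))
                     (P.length + pvTBc cap (accP + PySem.List.pyGetD pickups i 0)) : Nat) : Int)
               - ((P.length : Int) + (pvTBc cap (accP + PySem.List.pyGetD pickups i 0) : Int))) := by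
        omega
      push_cast at harith hpc' ⊢
      linear_combination hpc' + (-(cap:Int)) * harith
    · rw [pvH_app (i+1) (by omega) D P (hDb i List.mem_cons_self) (hPb i List.mem_cons_self)
        (pvTBc cap (accD + PySem.List.pyGetD deliveries i 0)) (pvTBc cap (accP + PySem.List.pyGetD pickups i 0)), hans]
      have harith : (pvTAc cap (dc + PySem.List.pyGetD deliveries i 0) (pc + PySem.List.pyGetD pickups i 0) : Int)
          = (((max (D.length + pvTBc cap (accD + PySem.List.pyGetD deliveries i 0))
                   (P.length + pvTBc cap (accP + PySem.List.pyGetD pickups i 0)) : Nat) : Int)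
            - ((max D.length P.length : Nat) : Int)) := by
        omega
      rw [harith]
      ring

-- ===== VERDICT (by name: the statement is the Claim_ definition above) =====
theorem solution_spec : Claim_equal_solution := by
  unfold Claim_equal_solution
  intro cap n deliveries pickups _ hpre
  obtain ⟨hcap | hn0, -, -⟩ := hpre
  case inr =>
    -- n ≤ 0: the index range is empty, both programs return 0 with any cap
    have hnil : PySem.List.pyRange (n-1) (-1) (-1) = [] :=
      PySem.List.pyRange_neg_one_eq_nil (by omega)
    unfold Spec_solution solution solution_alt pvTrips
    rw [hnil]
    simp
  unfold Spec_solution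
  have hrev : PySem.List.pyRange (n-1) (-1) (-1) = (PySem.List.pyRange 0 n).reverse := by
    have h := PySem.List.pyRange_neg_one_eq_reverse (n-1) (-1)
    norm_num at h
    exact h
  have hmem : ∀ i ∈ PySem.List.pyRange (n-1) (-1) (-1), (0:Int) ≤ i := by
    intro i hi
    rw [PySem.List.mem_pyRange_neg_one] at hi
    omega
  have hpw : (PySem.List.pyRange (n-1) (-1) (-1)).Pairwise (fun a b => b ≤ a) := by
    rw [hrev, List.pairwise_reverse]
    exact (PySem.List.pairwise_lt_pyRange_one 0 n).imp (fun h => le_of_lt h)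
  have hmain := pvMain cap hcap deliveries pickups (PySem.List.pyRange (n-1) (-1) (-1))
      0 0 0 0 0 [] [] (by simp) (by simp) hmem hpw (by simp) (by simp) (by simp [pvH])
  have hsol : solution cap n deliveries pickups
      = ((PySem.List.pyRange (n-1) (-1) (-1)).foldl (pvStepA cap deliveries pickups) (0, 0, 0)).1 := rfl
  have htr1 : pvTrips cap n deliveries
      = ((PySem.List.pyRange (n-1) (-1) (-1)).foldl (pvStepB cap deliveries) (0, [])).2 := rfl
  have htr2 : pvTrips cap n pickups
      = ((PySem.List.pyRange (n-1) (-1) (-1)).foldl (pvStepB cap pickups) (0, [])).2 := rfl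
  have hpos1 : ∀ x ∈ pvTrips cap n deliveries, (1:Int) ≤ x := by
    rw [htr1]; exact pvTrips_pos cap deliveries _ 0 [] hmem (by simp)
  have hpos2 : ∀ x ∈ pvTrips cap n pickups, (1:Int) ≤ x := by
    rw [htr2]; exact pvTrips_pos cap pickups _ 0 [] hmem (by simp)
  have hfold : ∀ (L : List (Int × Int)) (s : Int),
      L.foldl (fun (s : Int) (xy : Int × Int) => s + max xy.1 xy.2) s
        = s + (L.map (fun xy : Int × Int => max xy.1 xy.2)).sum :=
    pvZipFold (fun xy : Int × Int => max xy.1 xy.2)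
  have halt : solution_alt cap n deliveries pickups
      = 2 * (((pvTrips cap n deliveries ++ List.replicate
                (max (pvTrips cap n deliveries).length (pvTrips cap n pickups).length
                  - (pvTrips cap n deliveries).length) (0:Int)).zip
              (pvTrips cap n pickups ++ List.replicate
                (max (pvTrips cap n deliveries).length (pvTrips cap n pickups).length
                  - (pvTrips cap n pickups).length) (0:Int))).foldl
              (fun (s : Int) (xy : Int × Int) => s + max xy.1 xy.2) 0) := rfl
  rw [halt, hfold, zero_add,
    pvZipPad (pvTrips cap n deliveries) (pvTrips cap n pickups) _ _
      (fun x hx => by have := hpos1 x hx; omega)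
      (fun y hy => by have := hpos2 y hy; omega)
      (by omega)]
  rw [hsol, htr1, htr2]
  exact hmain
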